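-- pv_equiv track=rewrite | github.com/akshaysalvi948/Complaint-Gram | snowflake_deployment/app.py | enhance_caption_for_twitter
-- ===== SOURCE A (Python) =====
-- def enhance_caption_for_twitter(caption):
--     """Enhance a basic caption to be more tweet-worthy and engaging"""
--     if not caption or caption == "No description generated":
--         return "✨ Captured a moment worth sharing! #photography #share"
--
--     # Remove common generic phrases
--     caption = caption.replace("a photo of", "").replace("an image of", "").replace("a picture of", "")
--     caption = caption.replace("showing", "").replace("featuring", "").strip()
--
--     # Capitalize first letter
--     caption = caption[0].upper() + caption[1:] if caption else caption
--
--     # Add engaging elements based on content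
--     if any(word in caption.lower() for word in ["person", "people", "man", "woman", "child", "baby"]):
--         if "smiling" in caption.lower() or "happy" in caption.lower():
--             caption = f"😊 {caption}"
--         elif "serious" in caption.lower() or "focused" in caption.lower():
--             caption = f"🎯 {caption}"
--         else:
--             caption = f"👤 {caption}"
--     elif any(word in caption.lower() for word in ["food", "meal", "dish", "cooking", "restaurant"]):
--         caption = f"🍽️ {caption}"
--     elif any(word in caption.lower() for word in ["nature", "landscape", "mountain", "forest", "beach", "ocean"]):
--         caption = f"🌿 {caption}"
--     elif any(word in caption.lower() for word in ["city", "urban", "building", "street", "architecture"]):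
--         caption = f"🏙️ {caption}"
--     elif any(word in caption.lower() for word in ["animal", "dog", "cat", "pet", "wildlife"]):
--         caption = f"🐾 {caption}"
--     elif any(word in caption.lower() for word in ["art", "painting", "drawing", "creative", "design"]):
--         caption = f"🎨 {caption}"
--     elif any(word in caption.lower() for word in ["technology", "computer", "phone", "gadget", "tech"]):
--         caption = f"💻 {caption}"
--     else:
--         caption = f"✨ {caption}"
--
--     # Add relevant hashtags based on content
--     hashtags = []
--     if any(word in caption.lower() for word in ["beautiful", "amazing", "stunning", "gorgeous"]):
--         hashtags.append("#beautiful")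
--     if any(word in caption.lower() for word in ["sunset", "sunrise", "golden", "light"]):
--         hashtags.append("#goldenhour")
--     if any(word in caption.lower() for word in ["food", "delicious", "tasty", "cooking"]):
--         hashtags.append("#foodie")
--     if any(word in caption.lower() for word in ["travel", "adventure", "journey", "explore"]):
--         hashtags.append("#travel")
--     if any(word in caption.lower() for word in ["art", "creative", "design", "artistic"]):
--         hashtags.append("#art")
--
--     # Add a maximum of 2 hashtags to keep it clean
--     if len(hashtags) > 0:
--         caption += " " + " ".join(hashtags[:2])
--
--     # Ensure it's under 280 characters
--     if len(caption) > 280: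
--         caption = caption[:277] + "..."
--
--     return caption
-- ===== SOURCE B (Python) =====
-- # Different algorithm: instead of running a separate substring search per keyword
-- # (A's any(w in caption.lower() ...) cascade), B makes ONE positional scan over the
-- # lowered text per phase, collecting the set of ALL keywords that occur anywhere
-- # (a naive multi-pattern matcher); every decision is then a pure set-disjointness
-- # test against that precomputed set.
--
-- _PERSON = ["person", "people", "man", "woman", "child", "baby"]
-- _HAPPY = ["smiling", "happy"]
-- _SERIOUS = ["serious", "focused"]
--
-- _EMOJI_RULES = [
--     ("\U0001F37D\uFE0F", ["food", "meal", "dish", "cooking", "restaurant"]),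
--     ("\U0001F33F", ["nature", "landscape", "mountain", "forest", "beach", "ocean"]),
--     ("\U0001F3D9\uFE0F", ["city", "urban", "building", "street", "architecture"]),
--     ("\U0001F43E", ["animal", "dog", "cat", "pet", "wildlife"]),
--     ("\U0001F3A8", ["art", "painting", "drawing", "creative", "design"]),
--     ("\U0001F4BB", ["technology", "computer", "phone", "gadget", "tech"]),
-- ]
--
-- _HASHTAG_RULES = [
--     ("#beautiful", ["beautiful", "amazing", "stunning", "gorgeous"]),
--     ("#goldenhour", ["sunset", "sunrise", "golden", "light"]),
--     ("#foodie", ["food", "delicious", "tasty", "cooking"]),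
--     ("#travel", ["travel", "adventure", "journey", "explore"]),
--     ("#art", ["art", "creative", "design", "artistic"]),
-- ]
--
-- _EMOJI_KEYWORDS = _PERSON + _HAPPY + _SERIOUS + [w for _, ws in _EMOJI_RULES for w in ws]
-- _HASHTAG_KEYWORDS = [w for _, ws in _HASHTAG_RULES for w in ws]
--
-- _GENERIC_PHRASES = ["a photo of", "an image of", "a picture of", "showing", "featuring"]
--
--
-- def _occurring(text, keywords):
--     """One scan over text: the set of keywords occurring somewhere in it."""
--     found = set()
--     for i in range(len(text)):
--         for k in keywords:
--             if text.startswith(k, i):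
--                 found.add(k)
--     return found
--
--
-- def _pick_emoji(found):
--     if not found.isdisjoint(_PERSON):
--         if not found.isdisjoint(_HAPPY):
--             return "\U0001F60A"
--         if not found.isdisjoint(_SERIOUS):
--             return "\U0001F3AF"
--         return "\U0001F464"
--     for emoji, words in _EMOJI_RULES:
--         if not found.isdisjoint(words):
--             return emoji
--     return "\u2728"
--
--
-- def enhance_caption_for_twitter(caption):
--     if not caption or caption == "No description generated":
--         return "\u2728 Captured a moment worth sharing! #photography #share"
--
--     for phrase in _GENERIC_PHRASES:
--         caption = caption.replace(phrase, "")
--     caption = caption.strip()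
--
--     if caption:
--         caption = caption[0].upper() + caption[1:]
--
--     found = _occurring(caption.lower(), _EMOJI_KEYWORDS)
--     caption = _pick_emoji(found) + " " + caption
--
--     found2 = _occurring(caption.lower(), _HASHTAG_KEYWORDS)
--     tags = [t for t, ws in _HASHTAG_RULES if not found2.isdisjoint(ws)][:2]
--     if tags:
--         caption += " " + " ".join(tags)
--
--     if len(caption) > 280:
--         caption = caption[:277] + "..."
--
--     return caption
-- ===== Notes on version B (the rewrite author's own statement) =====
-- stated objective: alternative
-- what changed: Replaced the per-keyword substring-search cascade by a naive multi-pattern matcher: one positional scan over the lowered text per phase builds the set of all occurring keywords, and every emoji/hashtag decision becomes a set-disjointness test against that precomputed set (tables replace the elif chain).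
import Mathlib
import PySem

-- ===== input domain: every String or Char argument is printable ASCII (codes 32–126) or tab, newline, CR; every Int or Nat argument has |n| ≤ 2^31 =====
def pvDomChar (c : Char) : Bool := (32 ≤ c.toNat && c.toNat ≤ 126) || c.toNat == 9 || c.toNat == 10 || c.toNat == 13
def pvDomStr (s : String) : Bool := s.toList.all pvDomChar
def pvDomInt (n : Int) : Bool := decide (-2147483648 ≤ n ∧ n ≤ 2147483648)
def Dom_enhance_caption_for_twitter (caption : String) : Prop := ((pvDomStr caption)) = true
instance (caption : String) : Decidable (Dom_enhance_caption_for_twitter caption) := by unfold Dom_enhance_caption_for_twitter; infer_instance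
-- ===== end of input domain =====

-- B replaces A's per-keyword substring-search cascade by a single positional scan per
-- phase that builds the set of occurring keywords; decisions become set-disjointness
-- tests against that set (objective: alternative).

-- ===== PORT A =====
-- any(word in low for word in ws)
def pvAnyIn (low : String) (ws : List String) : Bool :=
  ws.any (fun w => PySem.Str.isIn w low)

def enhance_caption_for_twitter (caption : String) : String :=
  -- `not caption` on a str is `caption == ""`
  if caption == "" || caption == "No description generated" then
    "✨ Captured a moment worth sharing! #photography #share"
  else
    let caption := PySem.Str.replace (PySem.Str.replace (PySem.Str.replace caption "a photo of" "") "an image of" "") "a picture of" ""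
    let caption := PySem.Str.strip (PySem.Str.replace (PySem.Str.replace caption "showing" "") "featuring" "")
    -- caption[0].upper() + caption[1:] if caption else caption  (caption[0]/[1:] as take 1/drop 1 on code points; exact, caption nonempty in that branch)
    let caption := if caption != "" then String.ofList (PySem.Chars.upper (caption.toList.take 1) ++ caption.toList.drop 1) else caption
    let caption :=
      if pvAnyIn (PySem.Str.lower caption) ["person", "people", "man", "woman", "child", "baby"] then
        if PySem.Str.isIn "smiling" (PySem.Str.lower caption) || PySem.Str.isIn "happy" (PySem.Str.lower caption) then
          "😊 " ++ caption
        else if PySem.Str.isIn "serious" (PySem.Str.lower caption) || PySem.Str.isIn "focused" (PySem.Str.lower caption) then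
          "🎯 " ++ caption
        else
          "👤 " ++ caption
      else if pvAnyIn (PySem.Str.lower caption) ["food", "meal", "dish", "cooking", "restaurant"] then
        "🍽️ " ++ caption
      else if pvAnyIn (PySem.Str.lower caption) ["nature", "landscape", "mountain", "forest", "beach", "ocean"] then
        "🌿 " ++ caption
      else if pvAnyIn (PySem.Str.lower caption) ["city", "urban", "building", "street", "architecture"] then
        "🏙️ " ++ caption
      else if pvAnyIn (PySem.Str.lower caption) ["animal", "dog", "cat", "pet", "wildlife"] then
        "🐾 " ++ caption
      else if pvAnyIn (PySem.Str.lower caption) ["art", "painting", "drawing", "creative", "design"] then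
        "🎨 " ++ caption
      else if pvAnyIn (PySem.Str.lower caption) ["technology", "computer", "phone", "gadget", "tech"] then
        "💻 " ++ caption
      else
        "✨ " ++ caption
    let hashtags : List String := []
    let hashtags := if pvAnyIn (PySem.Str.lower caption) ["beautiful", "amazing", "stunning", "gorgeous"] then hashtags ++ ["#beautiful"] else hashtags
    let hashtags := if pvAnyIn (PySem.Str.lower caption) ["sunset", "sunrise", "golden", "light"] then hashtags ++ ["#goldenhour"] else hashtags
    let hashtags := if pvAnyIn (PySem.Str.lower caption) ["food", "delicious", "tasty", "cooking"] then hashtags ++ ["#foodie"] else hashtags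
    let hashtags := if pvAnyIn (PySem.Str.lower caption) ["travel", "adventure", "journey", "explore"] then hashtags ++ ["#travel"] else hashtags
    let hashtags := if pvAnyIn (PySem.Str.lower caption) ["art", "creative", "design", "artistic"] then hashtags ++ ["#art"] else hashtags
    let caption := if hashtags.length > 0 then caption ++ " " ++ PySem.Str.join " " (PySem.List.slice hashtags none (some 2)) else caption
    -- caption[:277] as take 277 on code points (exact)
    let caption := if PySem.Str.len caption > 280 then String.ofList (caption.toList.take 277) ++ "..." else caption
    caption

-- ===== PORT B =====
def pvPersonWords : List String := ["person", "people", "man", "woman", "child", "baby"]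
def pvHappyWords : List String := ["smiling", "happy"]
def pvSeriousWords : List String := ["serious", "focused"]

def pvEmojiRules : List (String × List String) :=
  [("🍽️", ["food", "meal", "dish", "cooking", "restaurant"]),
   ("🌿", ["nature", "landscape", "mountain", "forest", "beach", "ocean"]),
   ("🏙️", ["city", "urban", "building", "street", "architecture"]),
   ("🐾", ["animal", "dog", "cat", "pet", "wildlife"]),
   ("🎨", ["art", "painting", "drawing", "creative", "design"]),
   ("💻", ["technology", "computer", "phone", "gadget", "tech"])]

def pvHashtagRules : List (String × List String) :=
  [("#beautiful", ["beautiful", "amazing", "stunning", "gorgeous"]),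
   ("#goldenhour", ["sunset", "sunrise", "golden", "light"]),
   ("#foodie", ["food", "delicious", "tasty", "cooking"]),
   ("#travel", ["travel", "adventure", "journey", "explore"]),
   ("#art", ["art", "creative", "design", "artistic"])]

def pvEmojiKeywords : List String :=
  pvPersonWords ++ pvHappyWords ++ pvSeriousWords ++ pvEmojiRules.flatMap (·.2)
def pvHashtagKeywords : List String := pvHashtagRules.flatMap (·.2)

def pvGenericPhrases : List String :=
  ["a photo of", "an image of", "a picture of", "showing", "featuring"]

-- _occurring(text, keywords): one scan over positions; text.startswith(k, i) with
-- 0 ≤ i < len(text) is exactly `k is a prefix of text[i:]`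
def pvScan (text : String) (ks : List String) : PySem.Set String :=
  (List.range text.toList.length).foldl
    (fun found i =>
      ks.foldl (fun f k =>
        if PySem.Chars.startswith (text.toList.drop i) k.toList then PySem.Set.add f k else f) found)
    PySem.Set.empty

-- the `for emoji, words in _EMOJI_RULES` loop
def pvPickEmojiLoop (found : PySem.Set String) : List (String × List String) → String
  | [] => "✨"
  | (e, ws) :: rest =>
      if !(PySem.Set.isdisjoint found ws) then e else pvPickEmojiLoop found rest

def pvPickEmoji (found : PySem.Set String) : String :=
  if !(PySem.Set.isdisjoint found pvPersonWords) then
    if !(PySem.Set.isdisjoint found pvHappyWords) then "😊"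
    else if !(PySem.Set.isdisjoint found pvSeriousWords) then "🎯"
    else "👤"
  else pvPickEmojiLoop found pvEmojiRules

def enhance_caption_for_twitter_alt (caption : String) : String :=
  if caption == "" || caption == "No description generated" then
    "✨ Captured a moment worth sharing! #photography #share"
  else
    let caption := pvGenericPhrases.foldl (fun c p => PySem.Str.replace c p "") caption
    let caption := PySem.Str.strip caption
    let caption := if caption != "" then String.ofList (PySem.Chars.upper (caption.toList.take 1) ++ caption.toList.drop 1) else caption
    let found := pvScan (PySem.Str.lower caption) pvEmojiKeywords
    let caption := pvPickEmoji found ++ " " ++ caption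
    let found2 := pvScan (PySem.Str.lower caption) pvHashtagKeywords
    let tags := PySem.List.slice ((pvHashtagRules.filter (fun r => !(PySem.Set.isdisjoint found2 r.2))).map (·.1)) none (some 2)
    let caption := if tags ≠ [] then caption ++ " " ++ PySem.Str.join " " tags else caption
    if PySem.Str.len caption > 280 then String.ofList (caption.toList.take 277) ++ "..." else caption

-- ===== PRECONDITION & SPEC =====
def Spec_enhance_caption_for_twitter (caption : String) (out : String) : Prop := out = enhance_caption_for_twitter_alt caption
instance (caption : String) (out : String) : Decidable (Spec_enhance_caption_for_twitter caption out) := by unfold Spec_enhance_caption_for_twitter; infer_instance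

-- ===== CLAIM =====
def Claim_equal_enhance_caption_for_twitter : Prop := ∀ (caption : String), Dom_enhance_caption_for_twitter caption → Spec_enhance_caption_for_twitter caption (enhance_caption_for_twitter caption)

-- ===== LEMMAS AND PROOFS =====

-- the shared cleaning prefix of both ports (proof-only helper)
def pvClean (c : String) : String :=
  let c := PySem.Str.replace (PySem.Str.replace (PySem.Str.replace c "a photo of" "") "an image of" "") "a picture of" ""
  let c := PySem.Str.strip (PySem.Str.replace (PySem.Str.replace c "showing" "") "featuring" "")
  if c != "" then String.ofList (PySem.Chars.upper (c.toList.take 1) ++ c.toList.drop 1) else c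

-- A's tail after cleaning (proof-only helper; definitionally A's else-branch)
def pvTailA (caption : String) : String :=
  let caption :=
    if pvAnyIn (PySem.Str.lower caption) ["person", "people", "man", "woman", "child", "baby"] then
      if PySem.Str.isIn "smiling" (PySem.Str.lower caption) || PySem.Str.isIn "happy" (PySem.Str.lower caption) then
        "😊 " ++ caption
      else if PySem.Str.isIn "serious" (PySem.Str.lower caption) || PySem.Str.isIn "focused" (PySem.Str.lower caption) then
        "🎯 " ++ caption
      else
        "👤 " ++ caption
    else if pvAnyIn (PySem.Str.lower caption) ["food", "meal", "dish", "cooking", "restaurant"] then "🍽️ " ++ caption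
    else if pvAnyIn (PySem.Str.lower caption) ["nature", "landscape", "mountain", "forest", "beach", "ocean"] then "🌿 " ++ caption
    else if pvAnyIn (PySem.Str.lower caption) ["city", "urban", "building", "street", "architecture"] then "🏙️ " ++ caption
    else if pvAnyIn (PySem.Str.lower caption) ["animal", "dog", "cat", "pet", "wildlife"] then "🐾 " ++ caption
    else if pvAnyIn (PySem.Str.lower caption) ["art", "painting", "drawing", "creative", "design"] then "🎨 " ++ caption
    else if pvAnyIn (PySem.Str.lower caption) ["technology", "computer", "phone", "gadget", "tech"] then "💻 " ++ caption
    else "✨ " ++ caption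
  let hashtags : List String := []
  let hashtags := if pvAnyIn (PySem.Str.lower caption) ["beautiful", "amazing", "stunning", "gorgeous"] then hashtags ++ ["#beautiful"] else hashtags
  let hashtags := if pvAnyIn (PySem.Str.lower caption) ["sunset", "sunrise", "golden", "light"] then hashtags ++ ["#goldenhour"] else hashtags
  let hashtags := if pvAnyIn (PySem.Str.lower caption) ["food", "delicious", "tasty", "cooking"] then hashtags ++ ["#foodie"] else hashtags
  let hashtags := if pvAnyIn (PySem.Str.lower caption) ["travel", "adventure", "journey", "explore"] then hashtags ++ ["#travel"] else hashtags
  let hashtags := if pvAnyIn (PySem.Str.lower caption) ["art", "creative", "design", "artistic"] then hashtags ++ ["#art"] else hashtags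
  let caption := if hashtags.length > 0 then caption ++ " " ++ PySem.Str.join " " (PySem.List.slice hashtags none (some 2)) else caption
  if PySem.Str.len caption > 280 then String.ofList (caption.toList.take 277) ++ "..." else caption

-- B's tail after cleaning (proof-only helper; definitionally B's else-branch)
def pvTailB (caption : String) : String :=
  let found := pvScan (PySem.Str.lower caption) pvEmojiKeywords
  let caption := pvPickEmoji found ++ " " ++ caption
  let found2 := pvScan (PySem.Str.lower caption) pvHashtagKeywords
  let tags := PySem.List.slice ((pvHashtagRules.filter (fun r => !(PySem.Set.isdisjoint found2 r.2))).map (·.1)) none (some 2)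
  let caption := if tags ≠ [] then caption ++ " " ++ PySem.Str.join " " tags else caption
  if PySem.Str.len caption > 280 then String.ofList (caption.toList.take 277) ++ "..." else caption

-- membership after the inner `for k in keywords: if startswith: add`
theorem pv_mem_inner (p : String → Bool) (ks : List String) (f : PySem.Set String) (x : String) :
    x ∈ ks.foldl (fun f k => if p k then PySem.Set.add f k else f) f ↔
      x ∈ f ∨ (x ∈ ks ∧ p x = true) := by
  induction ks generalizing f with
  | nil => simp
  | cons k rest ih =>
      simp only [List.foldl_cons]
      rw [ih]
      by_cases hp : p k = true
      · rw [if_pos hp]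
        rw [show (x ∈ PySem.Set.add f k) = (x ∈ f ∨ x = k) from propext (PySem.Set.mem_add f k x)]
        constructor
        · rintro ((h | rfl) | ⟨h1, h2⟩)
          · exact Or.inl h
          · exact Or.inr ⟨List.mem_cons_self, hp⟩
          · exact Or.inr ⟨List.mem_cons_of_mem _ h1, h2⟩
        · rintro (h | ⟨h1, h2⟩)
          · exact Or.inl (Or.inl h)
          · rcases List.mem_cons.mp h1 with rfl | h1'
            · exact Or.inl (Or.inr rfl)
            · exact Or.inr ⟨h1', h2⟩
      · rw [if_neg hp]
        constructor
        · rintro (h | ⟨h1, h2⟩)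
          · exact Or.inl h
          · exact Or.inr ⟨List.mem_cons_of_mem _ h1, h2⟩
        · rintro (h | ⟨h1, h2⟩)
          · exact Or.inl h
          · rcases List.mem_cons.mp h1 with rfl | h1'
            · exact absurd h2 hp
            · exact Or.inr ⟨h1', h2⟩

-- membership after the outer scan over an arbitrary index list
theorem pv_mem_outer (text : List Char) (ks : List String) (is : List Nat)
    (f : PySem.Set String) (x : String) :
    x ∈ is.foldl (fun found i =>
        ks.foldl (fun f k =>
          if PySem.Chars.startswith (text.drop i) k.toList then PySem.Set.add f k else f) found) f ↔
      x ∈ f ∨ ∃ i ∈ is, x ∈ ks ∧ PySem.Chars.startswith (text.drop i) x.toList = true := by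
  induction is generalizing f with
  | nil => simp
  | cons i rest ih =>
      simp only [List.foldl_cons]
      rw [ih, pv_mem_inner]
      constructor
      · rintro ((h | ⟨h1, h2⟩) | ⟨j, hj, h1, h2⟩)
        · exact Or.inl h
        · exact Or.inr ⟨i, List.mem_cons_self, h1, h2⟩
        · exact Or.inr ⟨j, List.mem_cons_of_mem _ hj, h1, h2⟩
      · rintro (h | ⟨j, hj, h1, h2⟩)
        · exact Or.inl (Or.inl h)
        · rcases List.mem_cons.mp hj with rfl | hj'
          · exact Or.inl (Or.inr ⟨h1, h2⟩)
          · exact Or.inr ⟨j, hj', h1, h2⟩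

-- the scan computes exactly the set of keywords occurring as substrings
theorem pv_mem_scan (s : String) (ks : List String) (x : String)
    (hne : ∀ k ∈ ks, k.toList ≠ []) :
    x ∈ pvScan s ks ↔ x ∈ ks ∧ PySem.Str.isIn x s = true := by
  unfold pvScan
  rw [pv_mem_outer, PySem.Str.isIn_eq]
  simp only [PySem.Set.empty, List.not_mem_nil, false_or, List.mem_range]
  constructor
  · rintro ⟨i, _, h1, h2⟩
    exact ⟨h1, (PySem.Chars.exists_prefix_drop_iff_isIn _ _).mp
      ⟨i, (PySem.Chars.startswith_iff _ _).mp h2⟩⟩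
  · rintro ⟨h1, h2⟩
    rcases (PySem.Chars.exists_prefix_drop_iff_isIn x.toList s.toList).mpr h2 with ⟨j, hj⟩
    refine ⟨j, ?_, h1, (PySem.Chars.startswith_iff _ _).mpr hj⟩
    by_contra hlt
    rw [List.drop_eq_nil_of_le (Nat.le_of_not_lt hlt)] at hj
    exact hne x h1 (List.prefix_nil.mp hj)

-- a non-disjointness test against the scanned set IS A's any-substring test
theorem pv_cond (s : String) (ks ws : List String)
    (hsub : ∀ w ∈ ws, w ∈ ks) (hne : ∀ k ∈ ks, k.toList ≠ []) :
    (!(PySem.Set.isdisjoint (pvScan s ks) ws)) = pvAnyIn s ws := by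
  unfold PySem.Set.isdisjoint pvAnyIn
  rw [Bool.not_not, Bool.eq_iff_iff]
  simp only [List.any_eq_true, PySem.Set.contains, List.contains_iff_mem]
  constructor
  · rintro ⟨x, hx, hxw⟩
    rcases (pv_mem_scan s ks x hne).mp hx with ⟨_, hin⟩
    exact ⟨x, hxw, hin⟩
  · rintro ⟨w, hw, hin⟩
    exact ⟨w, (pv_mem_scan s ks w hne).mpr ⟨hsub w hw, hin⟩, hw⟩

-- all scanned keywords are nonempty strings
theorem pv_emoji_ne : ∀ k ∈ pvEmojiKeywords, k.toList ≠ [] := by decide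
theorem pv_hashtag_ne : ∀ k ∈ pvHashtagKeywords, k.toList ≠ [] := by decide

-- B's emoji pick (scan + table loop) equals A's cascade
theorem pv_emoji_eq (c : String) :
    pvPickEmoji (pvScan (PySem.Str.lower c) pvEmojiKeywords) ++ " " ++ c
    =
    (if pvAnyIn (PySem.Str.lower c) ["person", "people", "man", "woman", "child", "baby"] then
        if PySem.Str.isIn "smiling" (PySem.Str.lower c) || PySem.Str.isIn "happy" (PySem.Str.lower c) then
          "😊 " ++ c
        else if PySem.Str.isIn "serious" (PySem.Str.lower c) || PySem.Str.isIn "focused" (PySem.Str.lower c) then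
          "🎯 " ++ c
        else
          "👤 " ++ c
      else if pvAnyIn (PySem.Str.lower c) ["food", "meal", "dish", "cooking", "restaurant"] then "🍽️ " ++ c
      else if pvAnyIn (PySem.Str.lower c) ["nature", "landscape", "mountain", "forest", "beach", "ocean"] then "🌿 " ++ c
      else if pvAnyIn (PySem.Str.lower c) ["city", "urban", "building", "street", "architecture"] then "🏙️ " ++ c
      else if pvAnyIn (PySem.Str.lower c) ["animal", "dog", "cat", "pet", "wildlife"] then "🐾 " ++ c
      else if pvAnyIn (PySem.Str.lower c) ["art", "painting", "drawing", "creative", "design"] then "🎨 " ++ c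
      else if pvAnyIn (PySem.Str.lower c) ["technology", "computer", "phone", "gadget", "tech"] then "💻 " ++ c
      else "✨ " ++ c) := by
  simp only [pvPickEmoji, pvEmojiRules, pvPickEmojiLoop]
  rw [pv_cond _ _ pvPersonWords (by decide) pv_emoji_ne,
      pv_cond _ _ pvHappyWords (by decide) pv_emoji_ne,
      pv_cond _ _ pvSeriousWords (by decide) pv_emoji_ne,
      pv_cond _ _ ["food", "meal", "dish", "cooking", "restaurant"] (by decide) pv_emoji_ne,
      pv_cond _ _ ["nature", "landscape", "mountain", "forest", "beach", "ocean"] (by decide) pv_emoji_ne,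
      pv_cond _ _ ["city", "urban", "building", "street", "architecture"] (by decide) pv_emoji_ne,
      pv_cond _ _ ["animal", "dog", "cat", "pet", "wildlife"] (by decide) pv_emoji_ne,
      pv_cond _ _ ["art", "painting", "drawing", "creative", "design"] (by decide) pv_emoji_ne,
      pv_cond _ _ ["technology", "computer", "phone", "gadget", "tech"] (by decide) pv_emoji_ne]
  simp only [pvPersonWords, pvHappyWords, pvSeriousWords, pvAnyIn, List.any_cons, List.any_nil,
    Bool.or_false]
  split_ifs <;> rw [String.append_assoc] <;> rfl

-- B's filtered hashtag table equals A's chain of conditional appends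
theorem pv_hashtags_eq (c : String) :
    (pvHashtagRules.filter (fun r => !(PySem.Set.isdisjoint (pvScan (PySem.Str.lower c) pvHashtagKeywords) r.2))).map (fun r => r.1)
    =
    (let hashtags : List String := []
     let hashtags := if pvAnyIn (PySem.Str.lower c) ["beautiful", "amazing", "stunning", "gorgeous"] then hashtags ++ ["#beautiful"] else hashtags
     let hashtags := if pvAnyIn (PySem.Str.lower c) ["sunset", "sunrise", "golden", "light"] then hashtags ++ ["#goldenhour"] else hashtags
     let hashtags := if pvAnyIn (PySem.Str.lower c) ["food", "delicious", "tasty", "cooking"] then hashtags ++ ["#foodie"] else hashtags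
     let hashtags := if pvAnyIn (PySem.Str.lower c) ["travel", "adventure", "journey", "explore"] then hashtags ++ ["#travel"] else hashtags
     if pvAnyIn (PySem.Str.lower c) ["art", "creative", "design", "artistic"] then hashtags ++ ["#art"] else hashtags) := by
  simp only [pvHashtagRules, List.filter_cons, List.filter_nil]
  rw [pv_cond _ _ ["beautiful", "amazing", "stunning", "gorgeous"] (by decide) pv_hashtag_ne,
      pv_cond _ _ ["sunset", "sunrise", "golden", "light"] (by decide) pv_hashtag_ne,
      pv_cond _ _ ["food", "delicious", "tasty", "cooking"] (by decide) pv_hashtag_ne,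
      pv_cond _ _ ["travel", "adventure", "journey", "explore"] (by decide) pv_hashtag_ne,
      pv_cond _ _ ["art", "creative", "design", "artistic"] (by decide) pv_hashtag_ne]
  split_ifs <;> rfl

-- `if tags:` on hashtags[:2] takes the same branch as `if len(hashtags) > 0:`
theorem pv_guard_eq (hs : List String) (x y : String) :
    (if PySem.List.slice hs none (some 2) ≠ [] then x else y) =
    (if hs.length > 0 then x else y) := by
  rw [PySem.List.slice_to hs (by norm_num)]
  cases hs <;> simp

-- the two tails agree on every cleaned caption
theorem pv_tail_eq (c : String) : pvTailA c = pvTailB c := by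
  unfold pvTailA pvTailB
  dsimp only
  rw [pv_emoji_eq, pv_hashtags_eq]
  dsimp only
  rw [pv_guard_eq]

-- ===== VERDICT =====
theorem enhance_caption_for_twitter_spec : Claim_equal_enhance_caption_for_twitter := by
  intro caption _
  unfold Spec_enhance_caption_for_twitter
  have hA : enhance_caption_for_twitter caption =
      if caption == "" || caption == "No description generated" then
        "✨ Captured a moment worth sharing! #photography #share"
      else pvTailA (pvClean caption) := rfl
  have hB : enhance_caption_for_twitter_alt caption =
      if caption == "" || caption == "No description generated" then
        "✨ Captured a moment worth sharing! #photography #share"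
      else pvTailB (pvClean caption) := rfl
  rw [hA, hB]
  split_ifs
  · rfl
  · exact pv_tail_eq _
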